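-- pv_equiv track=rewrite | github.com/karlaHH/DeteccionDePlagios | OCRs/sinComentarios/ocr10.py | propiedad13
-- ===== SOURCE A (Python) =====
-- def propiedad13(img, tImTo):
--     alto=len(img)
--     ancho=int(tImTo/alto)
--     altu=int(alto/4)
--     numuns=0
--     val=0
--     for alt in range(alto):
--         for anch in range(ancho):
--             if alt==altu:
--                 compara=(int(img[altu][anch]))
--                 if compara!=val:
--                     numuns=numuns+1
--                     val=(int(img[altu][anch]))
--     return numuns
-- ===== SOURCE B (Python) =====
-- def _compress(xs):
--     # run-length compression by recursive run-skipping: keep one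
--     # representative per maximal run of equal values
--     if not xs:
--         return []
--     i = 1
--     while i < len(xs) and xs[i] == xs[0]:
--         i += 1
--     return [xs[0]] + _compress(xs[i:])
--
--
-- def propiedad13(img, tImTo):
--     alto = len(img)
--     ancho = int(tImTo / alto)
--     row = [int(x) for x in img[int(alto / 4)][:max(ancho, 0)]]
--     # transitions (with a virtual leading 0) = number of maximal runs of
--     # [0]+row, minus one
--     return len(_compress([0] + row)) - 1
-- ===== Notes on version B (the rewrite author's own statement) =====
-- stated objective: alternative
-- what changed: Replaces A's nested grid loop threading a 'val' accumulator with a two-stage run-length method: recursively compress the inspected row (with a virtual leading 0) into one representative per maximal run by run-skipping, then return the number of runs minus one.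
import Mathlib
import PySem

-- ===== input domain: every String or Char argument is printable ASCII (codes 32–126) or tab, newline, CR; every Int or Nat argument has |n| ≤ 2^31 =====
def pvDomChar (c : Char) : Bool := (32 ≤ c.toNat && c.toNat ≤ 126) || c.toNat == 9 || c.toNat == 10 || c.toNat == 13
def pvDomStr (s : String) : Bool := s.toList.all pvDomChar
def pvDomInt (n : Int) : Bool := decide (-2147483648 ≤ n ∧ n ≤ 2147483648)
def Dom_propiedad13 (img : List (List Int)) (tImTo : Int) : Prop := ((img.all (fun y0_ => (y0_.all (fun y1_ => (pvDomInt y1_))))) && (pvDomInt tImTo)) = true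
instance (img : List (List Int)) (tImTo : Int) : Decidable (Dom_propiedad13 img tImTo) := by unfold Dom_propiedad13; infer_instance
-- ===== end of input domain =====

-- B computes the answer by run-length compression: it recursively reduces the inspected row
-- (with a virtual leading 0) to one representative per maximal run and returns #runs − 1,
-- instead of A's nested grid loop threading a 'val' accumulator.

-- ===== PORT A =====
-- int(tImTo/alto) / int(alto/4): float division then truncation toward zero; exact as Int.tdiv
-- on the |n| ≤ 2^31 domain. img[altu][anch] ported with pyGetD (in range under Pre_).
def propiedad13 (img : List (List Int)) (tImTo : Int) : Int :=
  let alto : Int := (img.length : Int)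
  let ancho : Int := tImTo.tdiv alto
  let altu : Int := alto.tdiv 4
  let r :=
    (PySem.List.pyRange 0 alto 1).foldl (fun st alt =>
      (PySem.List.pyRange 0 ancho 1).foldl (fun st anch =>
        if alt = altu then
          if PySem.List.pyGetD (PySem.List.pyGetD img altu []) anch 0 ≠ st.2 then
            (st.1 + 1, PySem.List.pyGetD (PySem.List.pyGetD img altu []) anch 0)
          else st
        else st) st) ((0 : Int), (0 : Int))
  r.1

-- ===== PORT B =====
-- _compress from Source B: keep one representative per maximal run, recursing on the
-- suffix past the first run (the while loop skipping xs[i]==xs[0] is dropWhile on the tail).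
def compressRuns : List Int → List Int
  | [] => []
  | h :: t => h :: compressRuns (t.dropWhile (fun x => x == h))
termination_by xs => xs.length
decreasing_by
  simp only [List.length_cons]
  exact Nat.lt_succ_of_le (t.length_dropWhile_le _)

def propiedad13_alt (img : List (List Int)) (tImTo : Int) : Int :=
  let alto : Int := (img.length : Int)
  let ancho : Int := tImTo.tdiv alto
  let row := PySem.List.slice (PySem.List.pyGetD img (alto.tdiv 4) []) none (some (max ancho 0))
  ((compressRuns (0 :: row)).length : Int) - 1

-- ===== PRECONDITION & SPEC =====
-- Pre_ excludes exactly the inputs where A raises: img = [] (ZeroDivisionError) and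
-- ancho exceeding the inspected row's length (IndexError).
def Pre_propiedad13 (img : List (List Int)) (tImTo : Int) : Prop :=
  img ≠ [] ∧ tImTo.tdiv (img.length : Int) ≤ ((img.getD (img.length / 4) []).length : Int)
instance (img : List (List Int)) (tImTo : Int) : Decidable (Pre_propiedad13 img tImTo) := by
  unfold Pre_propiedad13; infer_instance

def pvWitness_propiedad13 : List (List Int) × Int := ([[1, 0, 1]], 3)

def Spec_propiedad13 (img : List (List Int)) (tImTo : Int) (out : Int) : Prop := out = propiedad13_alt img tImTo
instance (img : List (List Int)) (tImTo : Int) (out : Int) : Decidable (Spec_propiedad13 img tImTo out) := by unfold Spec_propiedad13; infer_instance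

-- ===== CLAIM (what is proved, stated in full; the proofs are below) =====
def Claim_equal_propiedad13 : Prop := ∀ (img : List (List Int)) (tImTo : Int), Dom_propiedad13 img tImTo → Pre_propiedad13 img tImTo → Spec_propiedad13 img tImTo (propiedad13 img tImTo)

-- ===== LEMMAS AND PROOFS =====

/-- Number of value changes in `v :: l` between adjacent entries. -/
def pairCount (v : Int) : List Int → Int
  | [] => 0
  | h :: t => (if h ≠ v then 1 else 0) + pairCount h t

/-- Last value of `v :: l`. -/
def lastVal (v : Int) : List Int → Int
  | [] => v
  | h :: t => lastVal h t

lemma foldl_const {α β : Type} (l : List α) (init : β) :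
    l.foldl (fun st _ => st) init = init := by
  induction l generalizing init <;> simp_all [List.foldl]

lemma foldl_skip {S : Type} (g : S → Int → S) (l : List Int) (altu : Int)
    (R : List Int) (h : ∀ x ∈ l, x ≠ altu) (init : S) :
    l.foldl (fun st alt =>
      R.foldl (fun st anch => if alt = altu then g st anch else st) st) init = init := by
  induction l generalizing init with
  | nil => rfl
  | cons a t ih =>
    have ha : a ≠ altu := h a (by simp)
    simp only [List.foldl_cons, if_neg ha]
    rw [foldl_const, ih (fun x hx => h x (by simp [hx]))]

lemma outer_eq {S : Type} (g : S → Int → S) (altu hi : Int)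
    (h1 : 0 ≤ altu) (h2 : altu < hi) (R : List Int) (init : S) :
    (PySem.List.pyRange 0 hi 1).foldl (fun st alt =>
      R.foldl (fun st anch => if alt = altu then g st anch else st) st) init
    = R.foldl g init := by
  rw [PySem.List.pyRange_one_append 0 altu hi h1 (le_of_lt h2),
      PySem.List.pyRange_one_cons h2, List.foldl_append, List.foldl_cons]
  rw [foldl_skip g _ altu R (fun x hx => by
        have := (PySem.List.mem_pyRange_one).1 hx; omega) init]
  have hmid : R.foldl (fun st anch => if altu = altu then g st anch else st) init
      = R.foldl g init := by simp
  rw [hmid, foldl_skip g _ altu R (fun x hx => by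
        have := (PySem.List.mem_pyRange_one).1 hx; omega)]

/-- Reading indices `0..m-1` of `row` equals folding over `row.take m.toNat`. -/
lemma inner_take (row : List Int) (m : Int) (h0 : 0 ≤ m) (hm : m ≤ (row.length : Int)) (st : Int × Int) :
    (PySem.List.pyRange 0 m 1).foldl (fun st anch =>
        if PySem.List.pyGetD row anch 0 ≠ st.2 then (st.1 + 1, PySem.List.pyGetD row anch 0)
        else st) st
    = (row.take m.toNat).foldl (fun st c => if c ≠ st.2 then (st.1 + 1, c) else st) st := by
  lift m to ℕ using h0
  rw [Int.toNat_natCast]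
  have hm' : m ≤ row.length := by exact_mod_cast hm
  clear hm
  induction m generalizing st with
  | zero => simp [PySem.List.pyRange_one_eq_nil]
  | succ k ih =>
    have hk : k < row.length := by omega
    have hcast : ((k : Int) + 1) = (((k + 1 : Nat)) : Int) := by push_cast; ring
    rw [← hcast, PySem.List.pyRange_one_succ_right (by positivity), List.foldl_append,
        ih st (by omega), List.take_add_one, List.foldl_append]
    simp [PySem.List.pyGetD_natCast, List.getD, List.getElem?_eq_getElem hk]

lemma foldA (l : List Int) : ∀ (n v : Int),
    l.foldl (fun st c => if c ≠ st.2 then (st.1 + 1, c) else st) (n, v)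
    = (n + pairCount v l, lastVal v l) := by
  induction l with
  | nil => intro n v; simp [pairCount, lastVal]
  | cons h t ih =>
    intro n v
    simp only [List.foldl_cons]
    by_cases hv : h = v
    · rw [if_neg (by simp [hv]), ih]
      simp [pairCount, lastVal, hv]
    · rw [if_pos (by simpa using hv), ih]
      simp only [pairCount, lastVal, if_pos (show h ≠ v from hv), Prod.mk.injEq, and_true]
      omega

/-- Dropping the leading run of `v`s does not change the transition count from `v`. -/
lemma pairCount_dropWhile (l : List Int) (v : Int) :
    pairCount v (l.dropWhile (fun x => x == v)) = pairCount v l := by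
  induction l with
  | nil => rfl
  | cons x t ih =>
    by_cases hx : x = v
    · subst hx
      simp only [List.dropWhile_cons, beq_self_eq_true, if_pos, pairCount]
      simpa using ih
    · simp [hx]

lemma dropWhile_head_ne (l : List Int) (v h : Int) (t : List Int)
    (hd : l.dropWhile (fun x => x == v) = h :: t) : h ≠ v := by
  induction l with
  | nil => cases hd
  | cons x s ih =>
    by_cases hx : x = v
    · subst hx
      simp only [List.dropWhile_cons, beq_self_eq_true, if_pos] at hd
      exact ih (by simpa using hd)
    · rw [List.dropWhile_cons, if_neg (by simpa using hx)] at hd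
      cases hd; exact hx

/-- Number of runs of `v :: l` = transition count (from `v`) + 1. -/
lemma lenCompress : ∀ (N : Nat) (v : Int) (l : List Int), l.length ≤ N →
    ((compressRuns (v :: l)).length : Int) = pairCount v l + 1 := by
  intro N
  induction N with
  | zero =>
    intro v l hl
    have hnil : l = [] := by cases l <;> simp_all
    subst hnil
    simp [compressRuns, pairCount]
  | succ N ih =>
    intro v l hl
    rw [compressRuns]
    cases hd : l.dropWhile (fun x => x == v) with
    | nil =>
      simp [compressRuns, ← pairCount_dropWhile l v, hd, pairCount]
    | cons h2 t2 =>
      have hlen : t2.length ≤ N := by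
        have h1 : (h2 :: t2).length ≤ l.length := hd ▸ l.length_dropWhile_le _
        simp only [List.length_cons] at h1
        omega
      have hne : h2 ≠ v := dropWhile_head_ne l v h2 t2 hd
      have hrec := ih h2 t2 hlen
      have hpc : pairCount v l = 1 + pairCount h2 t2 := by
        rw [← pairCount_dropWhile l v, hd]
        simp [pairCount, hne]
      simp only [List.length_cons]
      push_cast
      omega

lemma tdiv_cast (n : Nat) : ((n : Int)).tdiv 4 = ((n / 4 : Nat) : Int) := rfl

-- ===== VERDICT (by name: the statement is the Claim_ definition above) =====
theorem propiedad13_spec : Claim_equal_propiedad13 := by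
  intro img tImTo _dom hpre
  obtain ⟨hne, hle⟩ := hpre
  simp only [Spec_propiedad13, propiedad13, propiedad13_alt]
  set n := img.length with hn
  have hn1 : 1 ≤ n := by
    cases img with
    | nil => exact absurd rfl hne
    | cons a t => simp [hn]
  set ancho : Int := tImTo.tdiv (n : Int) with hancho
  rw [tdiv_cast n]
  have hrow : PySem.List.pyGetD img ((n / 4 : Nat) : Int) [] = img.getD (n / 4) [] := by
    rw [PySem.List.pyGetD_natCast]
  rw [hrow]
  set row := img.getD (n / 4) [] with hrowdef
  -- collapse the outer grid loop to the single relevant row altu = n / 4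
  rw [outer_eq
        (fun st anch =>
          if PySem.List.pyGetD row anch 0 ≠ st.2 then (st.1 + 1, PySem.List.pyGetD row anch 0)
          else st)
        (((n / 4 : Nat)) : Int) ((n : Int)) (by positivity)
        (by exact_mod_cast Nat.div_lt_self (by omega) (by omega))
        (PySem.List.pyRange 0 ancho 1) ((0 : Int), (0 : Int))]
  by_cases hpos : 0 ≤ ancho
  · -- inner index loop = fold over the prefix of the row; then #runs = transitions + 1
    rw [inner_take row ancho hpos hle, show max ancho 0 = ancho from max_eq_left hpos,
        PySem.List.slice_to row hpos, foldA,
        lenCompress (row.take ancho.toNat).length 0 (row.take ancho.toNat) le_rfl]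
    omega
  · -- ancho ≤ 0: both sides are 0
    rw [PySem.List.pyRange_one_eq_nil (by omega), show max ancho 0 = (0 : Int) from
        max_eq_right (by omega), PySem.List.slice_to row le_rfl]
    simp [compressRuns]
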